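-- pv_equiv track=rewrite | github.com/garrand00/Wanderer | tools/data_helper.py | search_name
-- ===== SOURCE A (Python) =====
-- def search_name(keyword, data):
--     keyword = keyword.lower()
--     items = list(data.keys())
--     results = []
--     results_data = {}
--
--     # Check if there's an exact match
--     for item in items:
--         if keyword == item.lower():
--             results.append(item)
--
--     if len(results) > 0:
--         results_data[results[0]] = data.get(results[0])
--         return results_data
--
--     # Check of a list of similar words for the user to choose
--     for item in items:
--         if keyword in item.lower():
--             results.append(item)
--
--     results.sort(key=lambda x: (
--         1 if x.lower() == keyword.lower() else
--         2 if x.lower().startswith(keyword.lower()) else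
--         4 if x.lower().endswith(keyword.lower()) else
--         3
--     ))
--
--     if len(results) > 0:
--         idx = 10 if len(results) > 10 else len(results)
--
--         for n in range(idx):
--             results_data[results[n]] = data.get(results[n])
--
--         return results_data
-- ===== SOURCE B (Python) =====
-- def search_name(keyword, data):
--     kw = keyword.lower()
--     starts, mids, ends = [], [], []
--     # one pass: first exact match returns immediately; otherwise bucket by rank
--     for key in data.keys():
--         low = key.lower()
--         if low == kw:
--             return {key: data.get(key)}
--         if kw in low:
--             if low.startswith(kw):
--                 starts.append(key)
--             elif low.endswith(kw):
--                 ends.append(key)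
--             else:
--                 mids.append(key)
--     ranked = (starts + mids + ends)[:10]
--     if ranked:
--         return {key: data.get(key) for key in ranked}
-- ===== Notes on version B (the rewrite author's own statement) =====
-- stated objective: alternative
-- what changed: Replaces A's two full scans plus a stable comparison sort over rank keys by a single pass that returns on the first exact match and otherwise distributes matching keys into three fixed rank buckets concatenated in rank order (no sort).
import Mathlib
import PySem

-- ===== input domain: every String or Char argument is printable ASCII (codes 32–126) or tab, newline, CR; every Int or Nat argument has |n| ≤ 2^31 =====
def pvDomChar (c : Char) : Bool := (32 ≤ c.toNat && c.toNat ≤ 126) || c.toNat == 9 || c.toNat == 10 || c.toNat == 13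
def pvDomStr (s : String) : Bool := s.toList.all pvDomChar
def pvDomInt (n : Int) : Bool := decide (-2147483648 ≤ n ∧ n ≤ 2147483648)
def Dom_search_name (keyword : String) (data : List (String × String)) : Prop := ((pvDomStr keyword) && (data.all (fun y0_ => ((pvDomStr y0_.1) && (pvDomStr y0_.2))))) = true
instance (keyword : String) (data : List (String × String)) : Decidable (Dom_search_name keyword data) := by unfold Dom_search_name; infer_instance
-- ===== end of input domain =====

-- B replaces A's two full scans plus a stable sort on rank keys by one pass with an
-- early exact-match return and three fixed rank buckets concatenated in rank order (no sort).
-- Both ports model the dict argument with PySem.Dict.ofList; data.get(k) is ported total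
-- (getD "") because it is only called on keys taken from the dict itself.

-- ===== PORT A =====
def search_name (keyword : String) (data : List (String × String)) : Option (List (String × String)) :=
  let kw := PySem.Str.lower keyword
  let d := PySem.Dict.ofList data
  let items := d.keys
  let results := items.foldl (fun acc item => if kw == PySem.Str.lower item then acc ++ [item] else acc) []
  if PySem.List.len results > 0 then
    let r0 := PySem.List.pyGetD results 0 ""
    some ((PySem.Dict.empty.insert r0 (d.getD r0 "")).items)
  else
    let results2 := items.foldl (fun acc item => if PySem.Str.isIn kw (PySem.Str.lower item) then acc ++ [item] else acc) results
    let resultsS := PySem.List.sorted results2 (fun x =>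
      if PySem.Str.lower x == PySem.Str.lower kw then (1 : Int)
      else if PySem.Str.startswith (PySem.Str.lower x) (PySem.Str.lower kw) then 2
      else if PySem.Str.endswith (PySem.Str.lower x) (PySem.Str.lower kw) then 4
      else 3) false
    if PySem.List.len resultsS > 0 then
      let idx : Int := if PySem.List.len resultsS > 10 then 10 else PySem.List.len resultsS
      let rd := (PySem.List.pyRange 0 idx 1).foldl (fun rd n =>
        rd.insert (PySem.List.pyGetD resultsS n "") (d.getD (PySem.List.pyGetD resultsS n "") "")) PySem.Dict.empty
      some rd.items
    else none

-- ===== PORT B =====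
def searchLoopB (kw : String) (d : PySem.Dict String String) :
    List String → List String → List String → List String → Option (List (String × String))
  | [], starts, mids, ends =>
    let ranked := PySem.List.slice (starts ++ mids ++ ends) none (some 10)
    if !ranked.isEmpty then
      some ((ranked.foldl (fun rd key => rd.insert key (d.getD key "")) PySem.Dict.empty).items)
    else none
  | key :: rest, starts, mids, ends =>
    let low := PySem.Str.lower key
    if low == kw then some ((PySem.Dict.empty.insert key (d.getD key "")).items)
    else if PySem.Str.isIn kw low then
      if PySem.Str.startswith low kw then searchLoopB kw d rest (starts ++ [key]) mids ends
      else if PySem.Str.endswith low kw then searchLoopB kw d rest starts mids (ends ++ [key])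
      else searchLoopB kw d rest starts (mids ++ [key]) ends
    else searchLoopB kw d rest starts mids ends

def search_name_alt (keyword : String) (data : List (String × String)) : Option (List (String × String)) :=
  let kw := PySem.Str.lower keyword
  let d := PySem.Dict.ofList data
  searchLoopB kw d d.keys [] [] []

-- ===== PRECONDITION & SPEC =====
def Spec_search_name (keyword : String) (data : List (String × String)) (out : Option (List (String × String))) : Prop := out = search_name_alt keyword data
instance (keyword : String) (data : List (String × String)) (out : Option (List (String × String))) : Decidable (Spec_search_name keyword data out) := by unfold Spec_search_name; infer_instance

-- ===== CLAIM (what is proved, stated in full; the proofs are below) =====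
def Claim_equal_search_name : Prop := ∀ (keyword : String) (data : List (String × String)), Dom_search_name keyword data → Spec_search_name keyword data (search_name keyword data)

-- ===== LEMMAS AND PROOFS =====

theorem char_le_toNat (a b : Char) : (a ≤ b) ↔ a.toNat ≤ b.toNat := by
  rw [Char.le_def]; exact UInt32.le_iff_toNat_le

theorem lowerChar_idem (c : Char) : PySem.Chars.lowerChar (PySem.Chars.lowerChar c) = PySem.Chars.lowerChar c := by
  unfold PySem.Chars.lowerChar PySem.Chars.isupper
  by_cases h : 'A' ≤ c ∧ c ≤ 'Z'
  · have hA : ('A' : Char).toNat = 65 := rfl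
    have hZ : ('Z' : Char).toNat = 90 := rfl
    have hb : 65 ≤ c.toNat ∧ c.toNat ≤ 90 := by
      constructor
      · exact hA ▸ (char_le_toNat _ _).1 h.1
      · exact hZ ▸ (char_le_toNat _ _).1 h.2
    have hv : (Char.ofNat (c.toNat + 32)).toNat = c.toNat + 32 := by
      rw [Char.toNat_ofNat, if_pos]
      left; omega
    have hno : ¬ (Char.ofNat (c.toNat + 32) ≤ 'Z') := by
      rw [char_le_toNat, hv, hZ]; omega
    simp [h.1, h.2, hno]
  · simp only [decide_eq_true_eq, Bool.and_eq_true] at *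
    rw [if_neg h, if_neg h]

theorem lower_idem (s : String) : PySem.Str.lower (PySem.Str.lower s) = PySem.Str.lower s := by
  rw [← String.toList_inj, PySem.Str.toList_lower, PySem.Str.toList_lower]
  unfold PySem.Chars.lower
  rw [List.map_map]
  exact List.map_congr_left (fun c _ => lowerChar_idem c)

theorem insertBy_forall_before {α : Type} (bf : α → α → Bool) (x : α) (v : List α)
    (h : ∀ y ∈ v, bf x y = true) : PySem.List.insertBy bf x v = x :: v := by
  cases v with
  | nil => rfl
  | cons y ys => simp [PySem.List.insertBy, h y (by simp)]

theorem insertBy_append_left {α : Type} (bf : α → α → Bool) (x : α) (u v : List α)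
    (h : ∀ y ∈ u, bf x y = false) :
    PySem.List.insertBy bf x (u ++ v) = u ++ PySem.List.insertBy bf x v := by
  induction u with
  | nil => rfl
  | cons y ys ih =>
    have hy := h y (by simp)
    have ih' := ih (fun z hz => h z (by simp [hz]))
    simp only [List.cons_append]
    rw [PySem.List.insertBy]
    simp [hy, ih']

-- A's sort key (with the keyword already lowered)
def rankOf (kw : String) (x : String) : Int :=
  if PySem.Str.lower x == kw then 1
  else if PySem.Str.startswith (PySem.Str.lower x) kw then 2
  else if PySem.Str.endswith (PySem.Str.lower x) kw then 4
  else 3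

theorem rankOf_cases (kw x : String) :
    rankOf kw x = 1 ∨ rankOf kw x = 2 ∨ rankOf kw x = 3 ∨ rankOf kw x = 4 := by
  unfold rankOf; split_ifs <;> simp

-- the stable sort on rank keys is exactly the concatenation of the four rank classes
theorem sorted_rank_classes (kw : String) (l : List String) :
    PySem.List.sorted l (rankOf kw) false =
      l.filter (fun x => rankOf kw x == 1) ++ l.filter (fun x => rankOf kw x == 2) ++
      l.filter (fun x => rankOf kw x == 3) ++ l.filter (fun x => rankOf kw x == 4) := by
  rw [PySem.List.sorted_eq_foldl_insertBy]
  induction l using List.reverseRecOn with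
  | nil => rfl
  | append_singleton l x ih =>
    rw [List.foldl_append, List.foldl_cons, List.foldl_nil, ih]
    have hf : ∀ (i : Int), List.filter (fun y => rankOf kw y == i) (l ++ [x]) =
        List.filter (fun y => rankOf kw y == i) l ++ if rankOf kw x = i then [x] else [] := by
      intro i
      rw [List.filter_append, List.filter_singleton]
      by_cases h : rankOf kw x = i
      · simp [h]
      · have hb : (rankOf kw x == i) = false := beq_eq_false_iff_ne.mpr h
        simp [hb]
        exact h
    have mem_rank : ∀ (i : Int) (y : String), y ∈ List.filter (fun z => rankOf kw z == i) l → rankOf kw y = i := by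
      intro i y hy
      have := List.of_mem_filter hy
      simpa using this
    rcases rankOf_cases kw x with hr | hr | hr | hr
    · -- rank 1 : goes at end of class 1
      rw [show (List.filter (fun y => rankOf kw y == 1) l ++ List.filter (fun y => rankOf kw y == 2) l ++
            List.filter (fun y => rankOf kw y == 3) l ++ List.filter (fun y => rankOf kw y == 4) l)
          = List.filter (fun y => rankOf kw y == 1) l ++ (List.filter (fun y => rankOf kw y == 2) l ++
            List.filter (fun y => rankOf kw y == 3) l ++ List.filter (fun y => rankOf kw y == 4) l) by simp]
      rw [insertBy_append_left _ _ _ _ (by intro y hy; have := mem_rank 1 y hy; simp [this, hr])]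
      rw [insertBy_forall_before _ _ _ (by
        intro y hy
        simp only [List.append_assoc, List.mem_append] at hy
        rcases hy with hy | hy | hy
        · have := mem_rank 2 y hy; simp [this, hr]
        · have := mem_rank 3 y hy; simp [this, hr]
        · have := mem_rank 4 y hy; simp [this, hr])]
      simp [hf, hr]
    · -- rank 2 : after class 2
      rw [show (List.filter (fun y => rankOf kw y == 1) l ++ List.filter (fun y => rankOf kw y == 2) l ++
            List.filter (fun y => rankOf kw y == 3) l ++ List.filter (fun y => rankOf kw y == 4) l)
          = (List.filter (fun y => rankOf kw y == 1) l ++ List.filter (fun y => rankOf kw y == 2) l) ++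
            (List.filter (fun y => rankOf kw y == 3) l ++ List.filter (fun y => rankOf kw y == 4) l) by simp]
      rw [insertBy_append_left _ _ _ _ (by
        intro y hy
        simp only [List.mem_append] at hy
        rcases hy with hy | hy
        · have := mem_rank 1 y hy; simp [this, hr]
        · have := mem_rank 2 y hy; simp [this, hr])]
      rw [insertBy_forall_before _ _ _ (by
        intro y hy
        simp only [List.mem_append] at hy
        rcases hy with hy | hy
        · have := mem_rank 3 y hy; simp [this, hr]
        · have := mem_rank 4 y hy; simp [this, hr])]
      simp [hf, hr]
    · -- rank 3 : after class 3
      rw [show (List.filter (fun y => rankOf kw y == 1) l ++ List.filter (fun y => rankOf kw y == 2) l ++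
            List.filter (fun y => rankOf kw y == 3) l ++ List.filter (fun y => rankOf kw y == 4) l)
          = (List.filter (fun y => rankOf kw y == 1) l ++ List.filter (fun y => rankOf kw y == 2) l ++
            List.filter (fun y => rankOf kw y == 3) l) ++ List.filter (fun y => rankOf kw y == 4) l by simp]
      rw [insertBy_append_left _ _ _ _ (by
        intro y hy
        simp only [List.append_assoc, List.mem_append] at hy
        rcases hy with hy | hy | hy
        · have := mem_rank 1 y hy; simp [this, hr]
        · have := mem_rank 2 y hy; simp [this, hr]
        · have := mem_rank 3 y hy; simp [this, hr])]
      rw [insertBy_forall_before _ _ _ (by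
        intro y hy
        have := mem_rank 4 y hy; simp [this, hr])]
      simp [hf, hr]
    · -- rank 4 : at the very end
      rw [PySem.List.insertBy_of_forall_not_before _ _ _ (by
        intro y hy
        simp only [List.append_assoc, List.mem_append] at hy
        rcases hy with hy | hy | hy | hy
        · have := mem_rank 1 y hy; simp [this, hr]
        · have := mem_rank 2 y hy; simp [this, hr]
        · have := mem_rank 3 y hy; simp [this, hr]
        · have := mem_rank 4 y hy; simp [this, hr])]
      simp [hf, hr]

-- a fold over range(n) reading xs[j] is a fold over take n xs
theorem foldl_range_getD {β : Type} (g : β → String → β) (xs : List String) (n : Nat)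
    (h : n ≤ xs.length) (init : β) :
    (PySem.List.pyRange 0 (n : Int) 1).foldl (fun acc j => g acc (PySem.List.pyGetD xs j "")) init
      = (xs.take n).foldl g init := by
  induction n generalizing init with
  | zero => simp [PySem.List.pyRange_one_eq_nil]
  | succ m ih =>
    have hm : m < xs.length := by omega
    rw [show ((m + 1 : Nat) : Int) = (m : Int) + 1 by push_cast; ring,
        PySem.List.pyRange_one_succ_right (by positivity), List.foldl_append,
        List.take_add_one, List.foldl_append, ih (by omega)]
    have hx : xs[m]?.toList = [xs[m]] := by simp [List.getElem?_eq_getElem hm]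
    rw [hx]
    simp [PySem.List.pyGetD_natCast, List.getD_eq_getElem?_getD, List.getElem?_eq_getElem hm]

-- characterisation of B's single pass
theorem loopB_spec (kw : String) (d : PySem.Dict String String) (items starts mids ends : List String) :
    searchLoopB kw d items starts mids ends =
      match items.filter (fun k => PySem.Str.lower k == kw) with
      | k :: _ => some ((PySem.Dict.empty.insert k (d.getD k "")).items)
      | [] =>
        let ranked := PySem.List.slice
          ((starts ++ items.filter (fun k => PySem.Str.isIn kw (PySem.Str.lower k) && PySem.Str.startswith (PySem.Str.lower k) kw)) ++
           (mids ++ items.filter (fun k => PySem.Str.isIn kw (PySem.Str.lower k) && !PySem.Str.startswith (PySem.Str.lower k) kw && !PySem.Str.endswith (PySem.Str.lower k) kw)) ++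
           (ends ++ items.filter (fun k => PySem.Str.isIn kw (PySem.Str.lower k) && !PySem.Str.startswith (PySem.Str.lower k) kw && PySem.Str.endswith (PySem.Str.lower k) kw))) none (some 10)
        if !ranked.isEmpty then
          some ((ranked.foldl (fun rd key => rd.insert key (d.getD key "")) PySem.Dict.empty).items)
        else none := by
  induction items generalizing starts mids ends with
  | nil => simp [searchLoopB]
  | cons key rest ih =>
    by_cases h1 : PySem.Str.lower key == kw
    · simp [searchLoopB, *]
    · have h1' : (PySem.Str.lower key == kw) = false := by simpa using h1
      by_cases h2 : PySem.Str.isIn kw (PySem.Str.lower key)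
      · by_cases h3 : PySem.Str.startswith (PySem.Str.lower key) kw
        · simp only [searchLoopB, h1', h2, h3, if_false, if_true, Bool.false_eq_true,
            List.filter_cons, ih]
          simp
        · by_cases h4 : PySem.Str.endswith (PySem.Str.lower key) kw
          · simp only [searchLoopB, h1', h2, h3, h4, if_false, if_true, Bool.false_eq_true,
              List.filter_cons, ih]
            simp
          · simp only [searchLoopB, h1', h2, h3, h4, if_false, if_true, Bool.false_eq_true,
              List.filter_cons, ih]
            simp
      · have h2' : (PySem.Str.isIn kw (PySem.Str.lower key)) = false := by simpa using h2
        simp only [searchLoopB, h1', h2', if_false, Bool.false_eq_true, List.filter_cons, ih]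
        simp

-- ===== VERDICT (by name: the statement is the Claim_ definition above) =====
theorem search_name_spec : Claim_equal_search_name := by
  unfold Claim_equal_search_name
  intro keyword data _
  unfold Spec_search_name search_name search_name_alt
  simp only [PySem.List.foldl_append_if_eq_filter, List.nil_append]
  have hkw : PySem.Str.lower (PySem.Str.lower keyword) = PySem.Str.lower keyword := lower_idem keyword
  set kw := PySem.Str.lower keyword with hkwdef
  set d : PySem.Dict String String := PySem.Dict.ofList data with hddef
  set items := d.keys with hitemsdef
  have hpq : items.filter (fun item => kw == PySem.Str.lower item)
      = items.filter (fun k => PySem.Str.lower k == kw) :=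
    List.filter_congr (fun x _ => by simp [eq_comm])
  rw [loopB_spec, hpq]
  cases hcase : items.filter (fun k => PySem.Str.lower k == kw) with
  | cons k ks =>
    simp [PySem.List.len_eq, PySem.List.pyGetD_zero_cons]
  | nil =>
    rw [if_neg (by simp [PySem.List.len_eq])]
    have hno : ∀ x ∈ items, (PySem.Str.lower x == kw) = false := by
      intro x hx
      by_contra hb
      have hmem : x ∈ items.filter (fun k => PySem.Str.lower k == kw) :=
        List.mem_filter.mpr ⟨hx, by simpa using hb⟩
      rw [hcase] at hmem; simp at hmem
    have hkey : (fun (x : String) =>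
        if PySem.Str.lower x == PySem.Str.lower kw then (1 : Int)
        else if PySem.Str.startswith (PySem.Str.lower x) (PySem.Str.lower kw) then 2
        else if PySem.Str.endswith (PySem.Str.lower x) (PySem.Str.lower kw) then 4
        else 3) = rankOf kw := by
      funext x
      rw [hkwdef, hkw]
      rfl
    rw [hkey, sorted_rank_classes]
    simp only [List.nil_append, List.filter_filter]
    have e1 : items.filter (fun a => (rankOf kw a == 1) && PySem.Str.isIn kw (PySem.Str.lower a)) = [] := by
      rw [List.filter_eq_nil_iff]
      intro x hx
      simp only [rankOf]
      rw [hno x hx]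
      simp only [Bool.false_eq_true, if_false]
      split_ifs <;> simp
    have e2 : items.filter (fun a => (rankOf kw a == 2) && PySem.Str.isIn kw (PySem.Str.lower a))
        = items.filter (fun k => PySem.Str.isIn kw (PySem.Str.lower k) && PySem.Str.startswith (PySem.Str.lower k) kw) := by
      apply List.filter_congr
      intro x hx
      simp only [rankOf]
      rw [hno x hx]
      simp only [Bool.false_eq_true, if_false]
      split_ifs with hs he
      · simp only [PySem.Str.startswith_eq, PySem.Str.toList_lower] at hs
        simp [hs, Bool.and_comm]
      · have hs' := eq_false_of_ne_true hs
        simp only [PySem.Str.startswith_eq, PySem.Str.toList_lower] at hs'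
        simp [hs']
      · have hs' := eq_false_of_ne_true hs
        simp only [PySem.Str.startswith_eq, PySem.Str.toList_lower] at hs'
        simp [hs']
    have e3 : items.filter (fun a => (rankOf kw a == 3) && PySem.Str.isIn kw (PySem.Str.lower a))
        = items.filter (fun k => PySem.Str.isIn kw (PySem.Str.lower k) && !PySem.Str.startswith (PySem.Str.lower k) kw && !PySem.Str.endswith (PySem.Str.lower k) kw) := by
      apply List.filter_congr
      intro x hx
      simp only [rankOf]
      rw [hno x hx]
      simp only [Bool.false_eq_true, if_false]
      split_ifs with hs he
      · simp only [PySem.Str.startswith_eq, PySem.Str.toList_lower] at hs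
        simp [hs]
      · have hs' := eq_false_of_ne_true hs
        simp only [PySem.Str.startswith_eq, PySem.Str.toList_lower] at hs'
        simp only [PySem.Str.endswith_eq, PySem.Str.toList_lower] at he
        simp [hs', he]
      · have hs' := eq_false_of_ne_true hs
        have he' := eq_false_of_ne_true he
        simp only [PySem.Str.startswith_eq, PySem.Str.toList_lower] at hs'
        simp only [PySem.Str.endswith_eq, PySem.Str.toList_lower] at he'
        simp [hs', he', Bool.and_comm]
    have e4 : items.filter (fun a => (rankOf kw a == 4) && PySem.Str.isIn kw (PySem.Str.lower a))
        = items.filter (fun k => PySem.Str.isIn kw (PySem.Str.lower k) && !PySem.Str.startswith (PySem.Str.lower k) kw && PySem.Str.endswith (PySem.Str.lower k) kw) := by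
      apply List.filter_congr
      intro x hx
      simp only [rankOf]
      rw [hno x hx]
      simp only [Bool.false_eq_true, if_false]
      split_ifs with hs he
      · simp only [PySem.Str.startswith_eq, PySem.Str.toList_lower] at hs
        simp [hs]
      · have hs' := eq_false_of_ne_true hs
        simp only [PySem.Str.startswith_eq, PySem.Str.toList_lower] at hs'
        simp only [PySem.Str.endswith_eq, PySem.Str.toList_lower] at he
        simp [hs', he, Bool.and_comm]
      · have hs' := eq_false_of_ne_true hs
        have he' := eq_false_of_ne_true he
        simp only [PySem.Str.startswith_eq, PySem.Str.toList_lower] at hs'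
        simp only [PySem.Str.endswith_eq, PySem.Str.toList_lower] at he'
        simp [hs', he']
    rw [e1, e2, e3, e4]
    simp only [List.nil_append, List.append_assoc]
    generalize (List.filter (fun k => PySem.Str.isIn kw (PySem.Str.lower k) && PySem.Str.startswith (PySem.Str.lower k) kw) items ++
        (List.filter (fun k => PySem.Str.isIn kw (PySem.Str.lower k) && !PySem.Str.startswith (PySem.Str.lower k) kw && !PySem.Str.endswith (PySem.Str.lower k) kw) items ++
         List.filter (fun k => PySem.Str.isIn kw (PySem.Str.lower k) && !PySem.Str.startswith (PySem.Str.lower k) kw && PySem.Str.endswith (PySem.Str.lower k) kw) items)) = S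
    have hslice : PySem.List.slice S none (some 10) = S.take 10 := by
      rw [PySem.List.slice_to (xs := S) (b := 10) (by norm_num)]
      rfl
    rw [hslice]
    have hidx : (if PySem.List.len S > 10 then (10 : Int) else PySem.List.len S)
        = ((min 10 S.length : Nat) : Int) := by
      simp only [PySem.List.len_eq]
      split_ifs with h <;> [skip; skip] <;> · push_cast; omega
    rw [hidx]
    have hfold := foldl_range_getD (fun rd key => rd.insert key (d.getD key "")) S (min 10 S.length) (Nat.min_le_right _ _) PySem.Dict.empty
    beta_reduce at hfold
    rw [hfold]
    have htake : S.take (min 10 S.length) = S.take 10 := by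
      rcases le_total S.length 10 with h | h
      · rw [Nat.min_eq_right h, List.take_of_length_le h, List.take_of_length_le (le_refl _)]
      · rw [Nat.min_eq_left h]
    rw [htake]
    by_cases hS : S = []
    · simp [hS]
    · have hpos : 0 < S.length := List.length_pos_iff.mpr hS
      simp [PySem.List.len_eq, List.take_eq_nil_iff, hS, hpos]
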